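-- pv_equiv track=rewrite | github.com/IgSit/ASD | ćw6/zad2 falling blocks.py | how_many_to_delete
-- ===== SOURCE A (Python) =====
-- def how_many_to_delete(arr):
--     n = len(arr)
--     func = [1] * n  # f(i) - length of LIS ending at index i
--     for i in range(n):
--         for j in range(i):
--             if arr[j][0] <= arr[i][0] and arr[j][1] >= arr[i][1] and func[j] + 1 > func[i]:
--                 func[i] = func[j] + 1
--
--     lis_len = max(func)
--     return n - lis_len
-- ===== SOURCE B (Python) =====
-- def how_many_to_delete(arr):
--     # Divide-and-conquer (CDQ-style): solve the left half completely, relax the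
--     # right half's values against the finished left half, then solve the right half.
--     def solve(blocks):
--         if len(blocks) <= 1:
--             return blocks
--         mid = len(blocks) // 2
--         left = solve(blocks[:mid])
--         right = blocks[mid:]
--         for b in right:
--             for a in left:
--                 if a[0] <= b[0] and a[1] >= b[1] and a[2] + 1 > b[2]:
--                     b[2] = a[2] + 1
--         return left + solve(right)
--     blocks = solve([[x, y, 1] for x, y in arr])
--     return len(arr) - max(b[2] for b in blocks)
-- ===== Notes on version B (the rewrite author's own statement) =====
-- stated objective: alternative
-- what changed: B replaces A's nested index-loop DP with a divide-and-conquer (CDQ-style) computation: recursively finish the left half, relax each right-half block's value against the finished left half, then recursively solve the right half; same totals, completely different control structure.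
import Mathlib
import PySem

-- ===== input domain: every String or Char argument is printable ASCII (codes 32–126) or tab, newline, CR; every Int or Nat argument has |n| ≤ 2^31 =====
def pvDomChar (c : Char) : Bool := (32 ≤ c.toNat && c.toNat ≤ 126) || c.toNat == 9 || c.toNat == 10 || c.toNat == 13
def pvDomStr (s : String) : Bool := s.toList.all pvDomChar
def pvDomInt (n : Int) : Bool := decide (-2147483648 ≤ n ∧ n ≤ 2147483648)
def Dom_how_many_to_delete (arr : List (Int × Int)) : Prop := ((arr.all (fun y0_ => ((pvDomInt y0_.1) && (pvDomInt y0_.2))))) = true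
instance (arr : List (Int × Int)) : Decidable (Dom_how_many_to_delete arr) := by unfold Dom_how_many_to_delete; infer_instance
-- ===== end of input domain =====

-- B replaces A's nested index-loop DP by a CDQ-style divide and conquer (solve left half,
-- relax right half against it, solve right half); same O(n^2) cost, objective: alternative.

-- ===== PORT A =====
-- Literal port of A. All list indices come from range(n)/range(i), hence are in range,
-- so arr[j], func[j], func[i] = pyGetD and func[i] = … = pySetD are exact here;
-- max(func) = PySem.List.max?, which is none exactly where Python raises (empty arr).
def how_many_to_delete (arr : List (Int × Int)) : Int :=
  let n : Int := arr.length
  let func : List Int := List.replicate arr.length 1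
  let func := (PySem.List.pyRange 0 n 1).foldl (fun func i =>
    (PySem.List.pyRange 0 i 1).foldl (fun func j =>
      let aj := PySem.List.pyGetD arr j (0, 0)
      let ai := PySem.List.pyGetD arr i (0, 0)
      if aj.1 ≤ ai.1 ∧ aj.2 ≥ ai.2 ∧ PySem.List.pyGetD func j 0 + 1 > PySem.List.pyGetD func i 0 then
        PySem.List.pySetD func i (PySem.List.pyGetD func j 0 + 1)
      else func) func) func
  n - (PySem.List.max? func (fun x => x)).getD 0

-- ===== PORT B =====
-- the inner 'for a in left' loop of Source B, relaxing one right-half block b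
def pvCross (L : List (Int × Int × Int)) (b : Int × Int × Int) : Int × Int × Int :=
  L.foldl (fun c a =>
    if a.1 ≤ c.1 ∧ a.2.1 ≥ c.2.1 ∧ a.2.2 + 1 > c.2.2 then (c.1, c.2.1, a.2.2 + 1) else c) b

-- Source B's recursive solve: left half, cross relaxation, right half
def pvSolve (blocks : List (Int × Int × Int)) : List (Int × Int × Int) :=
  if blocks.length ≤ 1 then blocks
  else
    pvSolve (blocks.take (blocks.length / 2)) ++
      pvSolve ((blocks.drop (blocks.length / 2)).map
        (pvCross (pvSolve (blocks.take (blocks.length / 2)))))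
termination_by blocks.length
decreasing_by
  all_goals simp only [List.length_take, List.length_map, List.length_drop]
  all_goals omega

def how_many_to_delete_alt (arr : List (Int × Int)) : Int :=
  (arr.length : Int) -
    (PySem.List.max? ((pvSolve (arr.map (fun p => (p.1, p.2, (1 : Int))))).map
      (fun b => b.2.2)) (fun x => x)).getD 0

-- ===== PRECONDITION & SPEC =====
-- Pre_ excludes only the empty list, on which A raises ValueError (max of empty sequence).
def Pre_how_many_to_delete (arr : List (Int × Int)) : Prop := arr ≠ []
instance (arr : List (Int × Int)) : Decidable (Pre_how_many_to_delete arr) := by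
  unfold Pre_how_many_to_delete; infer_instance

def pvWitness_how_many_to_delete : (List (Int × Int)) := [(1, 5), (2, 3)]

def Spec_how_many_to_delete (arr : List (Int × Int)) (out : Int) : Prop := out = how_many_to_delete_alt arr
instance (arr : List (Int × Int)) (out : Int) : Decidable (Spec_how_many_to_delete arr out) := by unfold Spec_how_many_to_delete; infer_instance

-- ===== CLAIM (what is proved, stated in full; the proofs are below) =====
def Claim_equal_how_many_to_delete : Prop := ∀ (arr : List (Int × Int)), Dom_how_many_to_delete arr → Pre_how_many_to_delete arr → Spec_how_many_to_delete arr (how_many_to_delete arr)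

-- ===== LEMMAS AND PROOFS =====

-- the dominance relation: block a may sit below block b
abbrev pvDm (a b : Int × Int) : Prop := a.1 ≤ b.1 ∧ b.2 ≤ a.2

-- canonical forward DP on pairs: best previous chain value dominating a
def pvBo (acc : List ((Int × Int) × Int)) (a : Int × Int) : Int :=
  acc.foldl (fun m pb => if pvDm pb.1 a then max m pb.2 else m) 0
def pvRun (l : List (Int × Int)) : List ((Int × Int) × Int) :=
  l.foldl (fun acc a => acc ++ [(a, pvBo acc a + 1)]) []
def pvMs (acc : List ((Int × Int) × Int)) : Int :=
  acc.foldl (fun m pb => max m pb.2) 0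

theorem pvRun_append (l : List (Int × Int)) (a : Int × Int) :
    pvRun (l ++ [a]) = pvRun l ++ [(a, pvBo (pvRun l) a + 1)] := by
  simp [pvRun, List.foldl_append]

theorem pvRun_length (l : List (Int × Int)) : (pvRun l).length = l.length := by
  induction l using List.reverseRecOn with
  | nil => rfl
  | append_singleton l a ih => simp [pvRun_append, ih]

theorem pvRun_fst (l : List (Int × Int)) : (pvRun l).map (·.1) = l := by
  induction l using List.reverseRecOn with
  | nil => rfl
  | append_singleton l a ih => simp [pvRun_append, ih]

theorem pvBoFold_le (a : Int × Int) (acc : List ((Int × Int) × Int)) :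
    ∀ m : Int, m ≤ acc.foldl (fun m pb => if pvDm pb.1 a then max m pb.2 else m) m := by
  induction acc with
  | nil => intro m; simp
  | cons pb t ih =>
      intro m
      rw [List.foldl_cons]
      refine le_trans ?_ (ih _)
      split
      · exact le_max_left _ _
      · exact le_refl m

theorem pvBo_nonneg (acc : List ((Int × Int) × Int)) (a : Int × Int) : 0 ≤ pvBo acc a :=
  pvBoFold_le a acc 0

theorem pvRun_snd_pos (l : List (Int × Int)) : ∀ pb ∈ pvRun l, 1 ≤ pb.2 := by
  induction l using List.reverseRecOn with
  | nil => intro pb hpb; simp [pvRun] at hpb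
  | append_singleton l a ih =>
      intro pb hpb
      rw [pvRun_append] at hpb
      rcases List.mem_append.1 hpb with h | h
      · exact ih pb h
      · have : pb = (a, pvBo (pvRun l) a + 1) := by simpa using h
        rw [this]
        have := pvBo_nonneg (pvRun l) a
        simpa using by omega

theorem pvBoShift (a : Int × Int) (acc : List ((Int × Int) × Int)) :
    ∀ c : Int,
      acc.foldl (fun acc pb => if pvDm pb.1 a then max acc (pb.2 + 1) else acc) (c + 1)
        = acc.foldl (fun m pb => if pvDm pb.1 a then max m pb.2 else m) c + 1 := by
  induction acc with
  | nil => intro c; rfl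
  | cons pb t ih =>
      intro c
      rw [List.foldl_cons, List.foldl_cons]
      by_cases h : pvDm pb.1 a
      · rw [if_pos h, if_pos h, show max (c + 1) (pb.2 + 1) = max c pb.2 + 1 from by omega]
        exact ih _
      · rw [if_neg h, if_neg h]; exact ih c

-- ===== A-side bridge =====
-- the inner-loop body of A's port, named for the proofs
def pvIB (arr : List (Int × Int)) (i : Int) (func : List Int) (j : Int) : List Int :=
  let aj := PySem.List.pyGetD arr j (0, 0)
  let ai := PySem.List.pyGetD arr i (0, 0)
  if aj.1 ≤ ai.1 ∧ aj.2 ≥ ai.2 ∧ PySem.List.pyGetD func j 0 + 1 > PySem.List.pyGetD func i 0 then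
    PySem.List.pySetD func i (PySem.List.pyGetD func j 0 + 1)
  else func

theorem pvA_unfold (arr : List (Int × Int)) :
    how_many_to_delete arr
      = (arr.length : Int) -
        (PySem.List.max?
          ((PySem.List.pyRange 0 (arr.length : Int) 1).foldl
            (fun func i => (PySem.List.pyRange 0 i 1).foldl (pvIB arr i) func)
            (List.replicate arr.length 1)) (fun x => x)).getD 0 := rfl

theorem pvInner (l : List (Int × Int)) (i : Nat) (hi : i < l.length) (rest : List Int) :
    ∀ m : Nat, m ≤ i → ∀ c : Int,
      (PySem.List.pyRange 0 (m : Int) 1).foldl (pvIB l (i : Int))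
          ((pvRun (l.take i)).map (·.2) ++ c :: rest)
        = (pvRun (l.take i)).map (·.2) ++
            (((pvRun (l.take i)).take m).foldl
              (fun acc pb => if pvDm pb.1 (l[i]'hi) then max acc (pb.2 + 1) else acc) c) :: rest := by
  have hGlen : ((pvRun (l.take i)).map (·.2)).length = i := by
    rw [List.length_map, pvRun_length, List.length_take]
    omega
  have hrunlen : (pvRun (l.take i)).length = i := by
    rw [pvRun_length, List.length_take]; omega
  intro m
  induction m with
  | zero =>
      intro _ c
      rw [show ((0 : Nat) : Int) = 0 from rfl, PySem.List.pyRange_one_eq_nil (le_refl 0)]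
      simp
  | succ m ih =>
      intro hm c
      have hml : m < l.length := by omega
      have hcast : ((m + 1 : Nat) : Int) = (m : Int) + 1 := by push_cast; ring
      rw [hcast, PySem.List.pyRange_one_succ_right (by positivity), List.foldl_append,
        List.foldl_cons, List.foldl_nil, ih (by omega) c]
      set G := (pvRun (l.take i)).map (·.2) with hG
      set cur := ((pvRun (l.take i)).take m).foldl
        (fun acc pb => if pvDm pb.1 (l[i]'hi) then max acc (pb.2 + 1) else acc) c with hcur
      have hfj : PySem.List.pyGetD (G ++ cur :: rest) (m : Int) 0 = ((pvRun (l.take i))[m]'(by omega)).2 := by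
        rw [PySem.List.pyGetD_natCast, List.getD_append _ _ _ _ (by omega),
          List.getD_eq_getElem _ _ (by omega)]
        simp [hG]
      have hfi : PySem.List.pyGetD (G ++ cur :: rest) (i : Int) 0 = cur := by
        rw [PySem.List.pyGetD_natCast]
        simp [List.getD, hGlen]
      have haj : PySem.List.pyGetD l (m : Int) (0, 0) = l[m]'hml := by
        rw [PySem.List.pyGetD_natCast, List.getD_eq_getElem _ _ hml]
      have hai : PySem.List.pyGetD l (i : Int) (0, 0) = l[i]'hi := by
        rw [PySem.List.pyGetD_natCast, List.getD_eq_getElem _ _ hi]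
      have hrunm : ((pvRun (l.take i))[m]'(by omega)).1 = l[m]'hml := by
        have h1 : ((pvRun (l.take i)).map (·.1))[m]'(by simpa [pvRun_length] using (by omega : m < (pvRun (l.take i)).length)) = (l.take i)[m]'(by rw [List.length_take]; omega) :=
          List.getElem_of_eq (pvRun_fst (l.take i)) _
        rw [List.getElem_map] at h1
        rw [h1, List.getElem_take]
      have hset : PySem.List.pySetD (G ++ cur :: rest) (i : Int)
          (((pvRun (l.take i))[m]'(by omega)).2 + 1)
          = G ++ (((pvRun (l.take i))[m]'(by omega)).2 + 1) :: rest := by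
        rw [PySem.List.pySetD_natCast, List.set_append, if_neg (by omega)]
        simp [hGlen]
      have htake : (pvRun (l.take i)).take (m + 1)
          = (pvRun (l.take i)).take m ++ [(pvRun (l.take i))[m]'(by omega)] :=
        List.take_succ_eq_append_getElem (by omega)
      rw [htake, List.foldl_append, List.foldl_cons, List.foldl_nil]
      unfold pvIB
      simp only [haj, hai, hfj, hfi, hset, hrunm]
      by_cases hd : pvDm (l[m]'hml) (l[i]'hi)
      · rw [if_pos hd]
        obtain ⟨hd1, hd2⟩ := hd
        by_cases hlt : ((pvRun (l.take i))[m]'(by omega)).2 + 1 > cur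
        · rw [if_pos ⟨hd1, hd2, hlt⟩]
          refine congrArg (fun z => G ++ z :: rest) ?_
          omega
        · rw [if_neg (fun hcon => hlt hcon.2.2)]
          refine congrArg (fun z => G ++ z :: rest) ?_
          omega
      · rw [if_neg hd, if_neg (fun hcon => hd ⟨hcon.1, hcon.2.1⟩)]

theorem pvOuter (l : List (Int × Int)) :
    ∀ k : Nat, k ≤ l.length →
      (PySem.List.pyRange 0 (k : Int) 1).foldl
          (fun func i => (PySem.List.pyRange 0 i 1).foldl (pvIB l i) func)
          (List.replicate l.length 1)
        = (pvRun (l.take k)).map (·.2) ++ List.replicate (l.length - k) 1 := by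
  intro k
  induction k with
  | zero =>
      intro _
      rw [show ((0 : Nat) : Int) = 0 from rfl, PySem.List.pyRange_one_eq_nil (le_refl 0)]
      simp [pvRun]
  | succ k ih =>
      intro hk
      have hkl : k < l.length := by omega
      have hcast : ((k + 1 : Nat) : Int) = (k : Int) + 1 := by push_cast; ring
      rw [hcast, PySem.List.pyRange_one_succ_right (by positivity), List.foldl_append,
        List.foldl_cons, List.foldl_nil, ih (by omega)]
      have hrep : List.replicate (l.length - k) (1 : Int)
          = 1 :: List.replicate (l.length - (k + 1)) 1 := by
        rw [show l.length - k = (l.length - (k + 1)) + 1 from by omega]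
        rfl
      rw [hrep, pvInner l k hkl _ k le_rfl 1]
      have htk : (pvRun (l.take k)).take k = pvRun (l.take k) := by
        apply List.take_of_length_le
        rw [pvRun_length, List.length_take]
        omega
      rw [htk]
      have hfold : (pvRun (l.take k)).foldl
            (fun acc pb => if pvDm pb.1 (l[k]'hkl) then max acc (pb.2 + 1) else acc) 1
          = pvBo (pvRun (l.take k)) (l[k]'hkl) + 1 := by
        have := pvBoShift (l[k]'hkl) (pvRun (l.take k)) 0
        simpa [pvBo] using this
      rw [hfold]
      rw [List.take_succ_eq_append_getElem hkl, pvRun_append, List.map_append]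
      simp

theorem pvMax_tail (l : List (Int × Int)) (h : l ≠ []) :
    ((PySem.List.max? ((pvRun l).map (·.2)) (fun x => x)).getD 0) = pvMs (pvRun l) := by
  have hne : (pvRun l).map (·.2) ≠ [] := by
    intro hnil
    have hlen := congrArg List.length hnil
    simp only [List.length_map, pvRun_length, List.length_nil] at hlen
    exact h (List.eq_nil_of_length_eq_zero hlen)
  cases hx : (pvRun l).map (·.2) with
  | nil => exact absurd hx hne
  | cons x t =>
      rw [PySem.List.max?_id_cons]
      have hms : pvMs (pvRun l) = ((pvRun l).map (·.2)).foldl max 0 := by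
        rw [List.foldl_map]; rfl
      have hx1 : (1 : Int) ≤ x := by
        have : x ∈ (pvRun l).map (·.2) := by rw [hx]; exact List.mem_cons_self
        rcases List.mem_map.1 this with ⟨pb, hpb, he⟩
        rw [← he]; exact pvRun_snd_pos l pb hpb
      rw [hms, hx, List.foldl_cons, show max (0 : Int) x = x from by omega]
      rfl

theorem pvA_eq (arr : List (Int × Int)) (h : arr ≠ []) :
    how_many_to_delete arr = (arr.length : Int) - pvMs (pvRun arr) := by
  rw [pvA_unfold, pvOuter arr arr.length le_rfl]
  rw [List.take_of_length_le (le_refl _), Nat.sub_self]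
  simp only [List.replicate_zero, List.append_nil]
  rw [pvMax_tail arr h]

-- ===== B-side bridge =====
-- the generalized forward DP on triples (x, y, base): gBoF folds the best dominating value
def pvGBoF (acc : List (Int × Int × Int)) (x y init : Int) : Int :=
  acc.foldl (fun m a => if a.1 ≤ x ∧ y ≤ a.2.1 then max m a.2.2 else m) init

def pvGStep (acc : List (Int × Int × Int)) (b : Int × Int × Int) : List (Int × Int × Int) :=
  acc ++ [(b.1, b.2.1, pvGBoF acc b.1 b.2.1 (b.2.2 - 1) + 1)]

def pvGRun (acc : List (Int × Int × Int)) (r : List (Int × Int × Int)) : List (Int × Int × Int) :=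
  r.foldl pvGStep acc

theorem pvGBoF_append (u v : List (Int × Int × Int)) (x y i : Int) :
    pvGBoF (u ++ v) x y i = pvGBoF v x y (pvGBoF u x y i) := by
  simp [pvGBoF, List.foldl_append]

theorem pvCross_eq (L : List (Int × Int × Int)) (b : Int × Int × Int) :
    pvCross L b = (b.1, b.2.1, pvGBoF L b.1 b.2.1 (b.2.2 - 1) + 1) := by
  obtain ⟨x, y, f⟩ := b
  suffices h : ∀ f : Int, pvCross L (x, y, f) = (x, y, pvGBoF L x y (f - 1) + 1) from h f
  induction L with
  | nil =>
      intro f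
      simp only [pvCross, pvGBoF, List.foldl_nil]
      refine congrArg (fun z => ((x : Int), (y : Int), z)) (by omega)
  | cons a t ih =>
      intro f
      simp only [pvCross, pvGBoF, List.foldl_cons] at *
      by_cases hd : a.1 ≤ x ∧ y ≤ a.2.1
      · by_cases hlt : a.2.2 + 1 > f
        · rw [if_pos ⟨hd.1, hd.2, hlt⟩, if_pos hd,
            show max (f - 1) a.2.2 = a.2.2 + 1 - 1 from by omega]
          exact ih (a.2.2 + 1)
        · rw [if_neg (fun hcon => hlt hcon.2.2), if_pos hd,
            show max (f - 1) a.2.2 = f - 1 from by omega]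
          exact ih f
      · rw [if_neg (fun hcon => hd ⟨hcon.1, hcon.2.1⟩), if_neg hd]
        exact ih f

-- the key CDQ split law: running the DP over r on top of a finished acc is the same as
-- relaxing every element of r against acc first and running the DP on the result alone
theorem pvGRun_split (r : List (Int × Int × Int)) (acc : List (Int × Int × Int)) :
    pvGRun acc r = acc ++ pvGRun [] (r.map (pvCross acc)) := by
  induction r using List.reverseRecOn with
  | nil => simp [pvGRun]
  | append_singleton r b ih =>
      simp only [pvGRun, List.map_append, List.map_cons, List.map_nil, List.foldl_append,
        List.foldl_cons, List.foldl_nil] at *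
      rw [ih, pvCross_eq]
      simp only [pvGStep, List.append_assoc]
      have h1 : pvGBoF acc b.1 b.2.1 (b.2.2 - 1) + 1 - 1 = pvGBoF acc b.1 b.2.1 (b.2.2 - 1) := by
        omega
      rw [h1, pvGBoF_append]

theorem pvSolve_eq (blocks : List (Int × Int × Int)) :
    pvSolve blocks = pvGRun [] blocks := by
  induction hn : blocks.length using Nat.strong_induction_on generalizing blocks with
  | _ n ih =>
      rw [pvSolve]
      by_cases h : blocks.length ≤ 1
      · rw [if_pos h]
        cases blocks with
        | nil => rfl
        | cons b t =>
            cases t with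
            | nil =>
                obtain ⟨x, y, f⟩ := b
                have hf : f - 1 + 1 = f := by omega
                simp [pvGRun, pvGStep, pvGBoF, hf]
            | cons c t => simp at h
      · rw [if_neg h]
        have h2 : 2 ≤ blocks.length := by omega
        have htl : (blocks.take (blocks.length / 2)).length = blocks.length / 2 := by
          rw [List.length_take]; omega
        have hL : pvSolve (blocks.take (blocks.length / 2))
            = pvGRun [] (blocks.take (blocks.length / 2)) :=
          ih _ (by omega) _ htl
        rw [hL]
        have hdl : ((blocks.drop (blocks.length / 2)).map
            (pvCross (pvGRun [] (blocks.take (blocks.length / 2))))).length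
            = blocks.length - blocks.length / 2 := by
          rw [List.length_map, List.length_drop]
        have hR : pvSolve ((blocks.drop (blocks.length / 2)).map
              (pvCross (pvGRun [] (blocks.take (blocks.length / 2)))))
            = pvGRun [] ((blocks.drop (blocks.length / 2)).map
              (pvCross (pvGRun [] (blocks.take (blocks.length / 2))))) :=
          ih _ (by omega) _ hdl
        rw [hR, ← pvGRun_split]
        simp only [pvGRun]
        rw [← List.foldl_append, List.take_append_drop]

-- the triple DP with all bases 1 is exactly the pair DP pvRun
theorem pvGRun_run (l : List (Int × Int)) :
    pvGRun [] (l.map (fun p => (p.1, p.2, (1 : Int))))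
      = (pvRun l).map (fun pb => (pb.1.1, pb.1.2, pb.2)) := by
  induction l using List.reverseRecOn with
  | nil => rfl
  | append_singleton l a ih =>
      simp only [List.map_append, List.map_cons, List.map_nil, pvGRun, List.foldl_append,
        List.foldl_cons, List.foldl_nil] at *
      rw [ih, pvRun_append, List.map_append]
      simp only [pvGStep, List.map_cons, List.map_nil]
      have h0 : pvGBoF ((pvRun l).map (fun pb => (pb.1.1, pb.1.2, pb.2))) a.1 a.2 (1 - 1)
          = pvBo (pvRun l) a := by
        unfold pvGBoF pvBo
        rw [List.foldl_map, show (1 : Int) - 1 = 0 from by norm_num]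
      rw [h0]

theorem pvB_eq (arr : List (Int × Int)) (h : arr ≠ []) :
    how_many_to_delete_alt arr = (arr.length : Int) - pvMs (pvRun arr) := by
  unfold how_many_to_delete_alt
  rw [pvSolve_eq, pvGRun_run]
  have hm : ((pvRun arr).map (fun pb => (pb.1.1, pb.1.2, pb.2))).map (fun b => b.2.2)
      = (pvRun arr).map (·.2) := by
    rw [List.map_map]; rfl
  rw [hm, pvMax_tail arr h]

-- ===== VERDICT (by name: the statement is the Claim_ definition above) =====
theorem how_many_to_delete_spec : Claim_equal_how_many_to_delete := by
  intro arr _ hpre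
  unfold Spec_how_many_to_delete
  rw [pvA_eq arr hpre, pvB_eq arr hpre]
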